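-- pv_equiv track=rewrite | github.com/KendrickPC/pythoncrashcourse | Chapter-8/8-17tryityourself.py | make_great
-- ===== SOURCE A (Python) =====
-- def make_great(magicians):
--     """Adding 'the great' to each magician's name."""
--     # Building a new list to hold great magicians
--     great_magicians = []
--     # Make each magician great, and add it to great_magicians
--     while magicians:
--         magician = magicians.pop()
--         great_magician = magician + ' the Great'
--         great_magicians.append(great_magician)
--     # Add the great magicians back into magician_names
--     for great_magician in great_magicians:
--         magicians.append(great_magician)
--
--     return magicians
--
-- magicians = ['Ken Dog', 'Kenneth', 'Ken']
--
-- great_magicians = make_great(magicians[:])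
-- ===== SOURCE B (Python) =====
-- def make_great(magicians):
--     """Adding 'the great' to each magician's name.
--
--     Mutates magicians in place (suffixed names in reversed order) and returns it.
--     """
--     magicians[:] = [name + ' the Great' for name in reversed(magicians)]
--     return magicians
-- ===== Notes on version B (the rewrite author's own statement) =====
-- stated objective: simpler
-- what changed: Replaces the pop/re-append two-phase stack loop with a single reversed-iteration comprehension assigned in place via slice assignment.
import Mathlib
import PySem

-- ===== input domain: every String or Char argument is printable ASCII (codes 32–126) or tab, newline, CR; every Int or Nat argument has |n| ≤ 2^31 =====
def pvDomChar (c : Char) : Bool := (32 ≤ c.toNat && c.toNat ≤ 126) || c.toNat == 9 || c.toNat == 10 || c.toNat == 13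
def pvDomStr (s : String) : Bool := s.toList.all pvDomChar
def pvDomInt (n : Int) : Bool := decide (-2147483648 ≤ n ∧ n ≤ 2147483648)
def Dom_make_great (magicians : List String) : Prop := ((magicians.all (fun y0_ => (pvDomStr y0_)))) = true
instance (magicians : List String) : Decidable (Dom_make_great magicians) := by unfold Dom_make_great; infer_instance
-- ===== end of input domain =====

-- B: one-line in-place rebuild (reversed comprehension) instead of A's pop/re-append two-phase stack loop.
-- Both mutate the argument list in place and return it; the equivalence proved here is about the return value.
-- ===== PORT A =====
-- while magicians: pop from the end, suffix, append to great_magicians; then copy back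
def make_great_loop (ms acc : List String) : List String :=
  match h : ms with
  | [] => acc
  | _ :: _ =>
      make_great_loop ms.dropLast (acc ++ [ms.getLast (by simp [h]) ++ " the Great"])
termination_by ms.length
decreasing_by simp [h, List.length_dropLast]

def make_great (magicians : List String) : List String :=
  make_great_loop magicians []

-- ===== PORT B =====
def make_great_alt (magicians : List String) : List String :=
  magicians.reverse.map (fun name => name ++ " the Great")

-- ===== PRECONDITION & SPEC =====
def Spec_make_great (magicians : List String) (out : List String) : Prop := out = make_great_alt magicians
instance (magicians : List String) (out : List String) : Decidable (Spec_make_great magicians out) := by unfold Spec_make_great; infer_instance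

-- ===== CLAIM (what is proved, stated in full; the proofs are below) =====
def Claim_equal_make_great : Prop := ∀ (magicians : List String), Dom_make_great magicians → Spec_make_great magicians (make_great magicians)

-- ===== LEMMAS AND PROOFS =====

theorem make_great_loop_eq (ms acc : List String) :
    make_great_loop ms acc = acc ++ ms.reverse.map (fun name => name ++ " the Great") := by
  induction ms using List.reverseRecOn generalizing acc with
  | nil => simp [make_great_loop]
  | append_singleton init x ih =>
      rw [make_great_loop.eq_def]
      split
      · simp_all
      · next heq =>
          simp only [← heq, List.dropLast_concat, List.getLast_append]
          rw [ih]
          simp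

-- ===== VERDICT =====
theorem make_great_spec : Claim_equal_make_great := by
  intro ms _
  unfold Spec_make_great make_great make_great_alt
  simpa using make_great_loop_eq ms []
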